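-- pv_equiv track=rewrite | github.com/m13v/social-autoposter | scripts/linkedin_comment_fetch.py | pick_reply
-- ===== SOURCE A (Python) =====
-- OUR_NAMES = {"matthew diakonov", "matt diakonov", "m13v"}
--
-- def _normalize(name):
--     return (name or "").lower().replace("premium profile you", "").replace("you", "").strip(" ·•").strip()
--
-- def _match_author(comment_author, target_author):
--     """Match comment author to target 'their_author' from notification.
--
--     LinkedIn renders authors as 'First Last Premium Profile You' or just 'First Last';
--     notifications may include extra text like ', MBA and 1 other'. Match on
--     prefix/substring after normalization.
--     """
--     c = _normalize(comment_author)
--     t = _normalize(target_author)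
--     if not c or not t:
--         return False
--     # Trim target to the first author ("Scott Benson, MBA and 1 other" -> "Scott Benson")
--     t_first = t.split(" and ")[0].split(",")[0].strip()
--     return t_first and (t_first in c or c in t_first)
--
-- def pick_reply(comments, target_author):
--     """From a list of comments, pick the one authored by target (not us)."""
--     # First pass: exact-ish match on target_author, excluding us
--     for c in comments:
--         author_norm = _normalize(c.get("author", ""))
--         if any(n in author_norm for n in OUR_NAMES):
--             continue
--         if _match_author(c.get("author"), target_author):
--             return c
--     # Fallback: first non-us comment with any content
--     for c in comments:
--         author_norm = _normalize(c.get("author", ""))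
--         if any(n in author_norm for n in OUR_NAMES):
--             continue
--         if c.get("content"):
--             return c
--     return None
-- ===== SOURCE B (Python) =====
-- OUR_NAMES = {"matthew diakonov", "matt diakonov", "m13v"}
--
-- def _normalize(name):
--     return (name or "").lower().replace("premium profile you", "").replace("you", "").strip(" ·•").strip()
--
-- def _match_author(comment_author, target_author):
--     c = _normalize(comment_author)
--     t = _normalize(target_author)
--     if not c or not t:
--         return False
--     t_first = t.split(" and ")[0].split(",")[0].strip()
--     return t_first and (t_first in c or c in t_first)
--
-- def pick_reply(comments, target_author):
--     """Single pass: return the first target-authored comment, else the first non-us comment with content."""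
--     fallback = None
--     for c in comments:
--         author_norm = _normalize(c.get("author", ""))
--         if any(n in author_norm for n in OUR_NAMES):
--             continue
--         if _match_author(c.get("author"), target_author):
--             return c
--         if fallback is None and c.get("content"):
--             fallback = c
--     return fallback
-- ===== Notes on version B (the rewrite author's own statement) =====
-- stated objective: alternative
-- what changed: Replaced A's two sequential scans (target-match pass, then content-fallback pass) by a single loop that returns a target match immediately while recording the first non-us comment with content as a fallback.
import Mathlib
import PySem

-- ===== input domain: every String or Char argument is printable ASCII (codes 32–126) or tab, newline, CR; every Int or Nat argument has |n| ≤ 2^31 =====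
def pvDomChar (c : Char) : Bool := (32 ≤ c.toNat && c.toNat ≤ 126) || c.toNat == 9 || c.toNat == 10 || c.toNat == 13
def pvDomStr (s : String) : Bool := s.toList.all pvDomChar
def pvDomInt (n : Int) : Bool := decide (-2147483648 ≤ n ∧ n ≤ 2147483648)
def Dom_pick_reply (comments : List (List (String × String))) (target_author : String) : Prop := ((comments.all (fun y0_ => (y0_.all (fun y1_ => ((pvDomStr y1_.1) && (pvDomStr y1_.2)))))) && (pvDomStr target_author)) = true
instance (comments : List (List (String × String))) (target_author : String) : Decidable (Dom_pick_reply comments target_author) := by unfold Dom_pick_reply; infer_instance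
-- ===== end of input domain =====

-- B replaces A's two sequential passes by ONE loop maintaining a fallback candidate (same results, one traversal).

-- ===== PORT A =====
-- shared helpers: literal ports of the module helpers both Pythons use
def pvNormalize (name : String) : String :=
  PySem.Str.strip (PySem.Str.stripChars
    (PySem.Str.replace (PySem.Str.replace (PySem.Str.lower name) "premium profile you" "") "you" "")
    " ·•")

def pvMatchAuthor (comment_author target_author : String) : Bool :=
  let c := pvNormalize comment_author
  let t := pvNormalize target_author
  if c = "" || t = "" then false
  else
    let t_first := PySem.Str.strip ((((PySem.Str.split? ((((PySem.Str.split? t " and ").getD []).headD "")) ",").getD []).headD ""))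
    decide (t_first ≠ "") && (PySem.Str.isIn t_first c || PySem.Str.isIn c t_first)

-- c.get("author", "") / c.get("author") (None normalizes like ""): first-match assoc lookup, default ""
def pvAuthor (c : List (String × String)) : String :=
  (PySem.Dict.get? (PySem.Dict.mk c) "author").getD ""

-- any(n in author_norm for n in OUR_NAMES)
def pvIsUs (author_norm : String) : Bool :=
  ["matthew diakonov", "matt diakonov", "m13v"].any (fun n => PySem.Str.isIn n author_norm)

-- truthiness of c.get("content"): present and non-empty
def pvHasContent (c : List (String × String)) : Bool :=
  decide (((PySem.Dict.get? (PySem.Dict.mk c) "content").getD "") ≠ "")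

-- first pass of A: first non-us comment matching target_author
def pvPass1 : List (List (String × String)) → String → Option (List (String × String))
  | [], _ => none
  | c :: rest, t =>
    if pvIsUs (pvNormalize (pvAuthor c)) then pvPass1 rest t
    else if pvMatchAuthor (pvAuthor c) t then some c
    else pvPass1 rest t

-- second pass of A: first non-us comment with content
def pvPass2 : List (List (String × String)) → Option (List (String × String))
  | [] => none
  | c :: rest =>
    if pvIsUs (pvNormalize (pvAuthor c)) then pvPass2 rest
    else if pvHasContent c then some c
    else pvPass2 rest

def pick_reply (comments : List (List (String × String))) (target_author : String) : Option (List (String × String)) :=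
  match pvPass1 comments target_author with
  | some c => some c
  | none => pvPass2 comments

-- ===== PORT B =====
-- single loop; fb is the 'fallback' variable
def pvPickLoop : List (List (String × String)) → String → Option (List (String × String)) → Option (List (String × String))
  | [], _, fb => fb
  | c :: rest, t, fb =>
    if pvIsUs (pvNormalize (pvAuthor c)) then pvPickLoop rest t fb
    else if pvMatchAuthor (pvAuthor c) t then some c
    else if fb.isNone && pvHasContent c then pvPickLoop rest t (some c)
    else pvPickLoop rest t fb

def pick_reply_alt (comments : List (List (String × String))) (target_author : String) : Option (List (String × String)) :=
  pvPickLoop comments target_author none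

-- ===== PRECONDITION & SPEC =====
def Spec_pick_reply (comments : List (List (String × String))) (target_author : String) (out : Option (List (String × String))) : Prop := out = pick_reply_alt comments target_author
instance (comments : List (List (String × String))) (target_author : String) (out : Option (List (String × String))) : Decidable (Spec_pick_reply comments target_author out) := by unfold Spec_pick_reply; infer_instance

-- ===== CLAIM (what is proved, stated in full; the proofs are below) =====
def Claim_equal_pick_reply : Prop := ∀ (comments : List (List (String × String))) (target_author : String), Dom_pick_reply comments target_author → Spec_pick_reply comments target_author (pick_reply comments target_author)

-- ===== LEMMAS AND PROOFS =====
-- loop invariant: B's loop with fallback fb is pass1, else fb, else pass2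
theorem pvPickLoop_eq (l : List (List (String × String))) (t : String)
    (fb : Option (List (String × String))) :
    pvPickLoop l t fb =
      match pvPass1 l t with
      | some c => some c
      | none => match fb with
        | some f => some f
        | none => pvPass2 l := by
  induction l generalizing fb with
  | nil => cases fb <;> simp [pvPickLoop, pvPass1, pvPass2]
  | cons c rest ih =>
    by_cases hus : pvIsUs (pvNormalize (pvAuthor c)) = true
    · simp [pvPickLoop, pvPass1, pvPass2, hus, ih]
    · by_cases hm : pvMatchAuthor (pvAuthor c) t = true
      · simp [pvPickLoop, pvPass1, hus, hm]
      · by_cases hc : pvHasContent c = true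
        · cases fb with
          | none =>
            simp [pvPickLoop, pvPass1, pvPass2, hus, hm, hc, ih]
          | some f =>
            simp [pvPickLoop, pvPass1, hus, hm, ih]
        · cases fb <;> simp [pvPickLoop, pvPass1, pvPass2, hus, hm, hc, ih]

-- ===== VERDICT (by name: the statement is the Claim_ definition above) =====
theorem pick_reply_spec : Claim_equal_pick_reply := by
  intro comments t _
  unfold Spec_pick_reply pick_reply pick_reply_alt
  rw [pvPickLoop_eq]
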